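-- pv_equiv track=rewrite | github.com/Ponynie/AlgoDsgnLabChula | lab3/check_greedy_2.py | grabNgub
-- ===== SOURCE A (Python) =====
-- def grabNgub(arr, k):
--     i = 0
--     l = 0
--     r = 0
--     res = 0
--     Pass = []
--     Grab = []
--
--     while i < len(arr):
--         if arr[i] == 'G':
--             Grab.append(i)
--         elif arr[i] == 'P':
--             Pass.append(i)
--         i += 1
--
--     while l < len(Pass) and r < len(Grab):
--
--         if (abs( Pass[l] - Grab[r] ) <= k):
--             res += 1
--             l += 1
--             r += 1
--
--         elif Pass[l] < Grab[r]:
--             l += 1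
--         else:
--             r += 1
--
--     return res
-- ===== SOURCE B (Python) =====
-- def grabNgub(arr, k):
--     # single pass: FIFO queue (list + head index) of pending unmatched positions + their char type
--     pend = []
--     head = 0
--     ptype = None
--     res = 0
--     for i, c in enumerate(arr):
--         if c != 'G' and c != 'P':
--             continue
--         if head == len(pend) or ptype == c:
--             pend.append(i)
--             ptype = c
--         else:
--             while head < len(pend) and i - pend[head] > k:
--                 head += 1
--             if head < len(pend):
--                 head += 1
--                 res += 1
--             else:
--                 pend = [i]
--                 head = 0
--                 ptype = c
--     return res
-- ===== Notes on version B (the rewrite author's own statement) =====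
-- stated objective: faster
-- what changed: Replaces A's two-phase build-Grab/Pass-lists-then-two-pointer-merge with a single left-to-right pass over arr that maintains one FIFO queue of pending unmatched positions plus their character type, matching/evicting as each 'G'/'P' arrives.
import Mathlib
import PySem

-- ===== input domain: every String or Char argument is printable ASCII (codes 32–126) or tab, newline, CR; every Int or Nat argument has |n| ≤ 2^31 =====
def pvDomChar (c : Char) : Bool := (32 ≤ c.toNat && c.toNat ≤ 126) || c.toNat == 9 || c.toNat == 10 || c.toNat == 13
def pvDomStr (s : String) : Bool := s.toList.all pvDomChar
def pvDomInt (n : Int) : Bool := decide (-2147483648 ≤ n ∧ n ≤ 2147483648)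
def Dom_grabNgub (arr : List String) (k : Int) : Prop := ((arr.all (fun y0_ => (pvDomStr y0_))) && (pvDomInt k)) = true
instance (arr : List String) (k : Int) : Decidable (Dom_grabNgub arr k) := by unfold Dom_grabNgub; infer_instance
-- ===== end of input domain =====

-- B replaces A's two-phase build-then-two-pointer-merge with one left-to-right pass that
-- keeps a single FIFO queue of pending unmatched positions (plus their character type);
-- same O(n) cost, different decomposition.

-- ===== PORT A =====
-- first while loop of A: scan arr with index i, collecting positions of 'G' and 'P'
def grabBuildPG : List String → Int → List Int × List Int
  | [], _ => ([], [])
  | s :: rest, i =>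
    let (g, p) := grabBuildPG rest (i + 1)
    if s = "G" then (i :: g, p)
    else if s = "P" then (g, i :: p)
    else (g, p)

-- second while loop of A: two pointers l over Pass, r over Grab (here: fronts of the lists)
def grabMerge (k : Int) : List Int → List Int → Int
  | [], _ => 0
  | _ :: _, [] => 0
  | p :: ps, g :: gs =>
    if |p - g| ≤ k then 1 + grabMerge k ps gs
    else if p < g then grabMerge k ps (g :: gs)
    else grabMerge k (p :: ps) gs
termination_by a b => a.length + b.length
decreasing_by all_goals (simp; try omega)

def grabNgub (arr : List String) (k : Int) : Int :=
  let (grab, pass) := grabBuildPG arr 0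
  grabMerge k pass grab

-- ===== PORT B =====
-- B's for-loop; the Python queue (list pend + head index) is the list `pend` here:
-- append = pend ++ [i], the evict-while-loop = dropWhile, popleft = tail.
def grabGo (k : Int) : List String → Int → List Int → String → Int → Int
  | [], _, _, _, res => res
  | c :: rest, i, pend, ptype, res =>
    if ¬(c = "G" ∨ c = "P") then grabGo k rest (i + 1) pend ptype res
    else if pend = [] ∨ ptype = c then grabGo k rest (i + 1) (pend ++ [i]) c res
    else
      match pend.dropWhile (fun p => decide (i - p > k)) with
      | [] => grabGo k rest (i + 1) [i] c res
      | _ :: ps => grabGo k rest (i + 1) ps ptype (res + 1)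

def grabNgub_alt (arr : List String) (k : Int) : Int :=
  grabGo k arr 0 [] "" 0

-- ===== PRECONDITION & SPEC =====
def Spec_grabNgub (arr : List String) (k : Int) (out : Int) : Prop := out = grabNgub_alt arr k
instance (arr : List String) (k : Int) (out : Int) : Decidable (Spec_grabNgub arr k out) := by unfold Spec_grabNgub; infer_instance

-- ===== CLAIM (what is proved, stated in full; the proofs are below) =====
def Claim_equal_grabNgub : Prop := ∀ (arr : List String) (k : Int), Dom_grabNgub arr k → Spec_grabNgub arr k (grabNgub arr k)

-- ===== LEMMAS AND PROOFS =====

-- proof-only helpers about List.dropWhile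
theorem pvDropWhile_mem (f : Int → Bool) : ∀ (l : List Int) (x : Int), x ∈ l.dropWhile f → x ∈ l := by
  intro l
  induction l with
  | nil => intro x h; simpa [List.dropWhile] using h
  | cons a t ih =>
    intro x h
    by_cases hf : f a
    · simp only [List.dropWhile_cons, hf, if_true] at h
      exact List.mem_cons_of_mem a (ih x h)
    · simp only [List.dropWhile_cons, hf, if_false, Bool.false_eq_true] at h
      exact h

theorem pvDropWhile_head_false (f : Int → Bool) : ∀ (l : List Int) (x : Int) (xs : List Int),
    l.dropWhile f = x :: xs → f x = false := by
  intro l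
  induction l with
  | nil => intro x xs h; simp [List.dropWhile] at h
  | cons a t ih =>
    intro x xs h
    by_cases hf : f a
    · simp only [List.dropWhile_cons, hf, if_true] at h
      exact ih x xs h
    · simp only [List.dropWhile_cons, hf, if_false, Bool.false_eq_true] at h
      cases h
      simpa using hf

-- with an empty pending queue, grabGo does not depend on the stored type tag
theorem grabGo_nil_type (k : Int) : ∀ (rest : List String) (i res : Int) (t t' : String),
    grabGo k rest i [] t res = grabGo k rest i [] t' res := by
  intro rest
  induction rest with
  | nil => intro i res t t'; rfl
  | cons c rs ih =>
    intro i res t t'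
    simp only [grabGo]
    by_cases h : c = "G" ∨ c = "P"
    · simp [h]
    · simp only [if_pos (by simp [h] : ¬(c = "G" ∨ c = "P"))]
      exact ih _ _ t t'

-- stale fronts of the Pass queue are skipped by A's merge exactly like dropWhile
theorem grabMerge_dropP (k i : Int) (P' G' : List Int) :
    ∀ pend : List Int, (∀ p ∈ pend, p < i) →
    grabMerge k (pend ++ P') (i :: G') =
      grabMerge k (pend.dropWhile (fun p => decide (i - p > k)) ++ P') (i :: G') := by
  intro pend
  induction pend with
  | nil => intro _; rfl
  | cons p t ih =>
    intro h
    have hp : p < i := h p (by simp)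
    by_cases hd : i - p > k
    · have habs : ¬ |p - i| ≤ k := by rw [abs_sub_comm, abs_of_pos (by omega)]; omega
      simp only [List.dropWhile_cons, hd, decide_true, if_true, List.cons_append, grabMerge, habs,
        if_false, if_pos hp]
      exact ih (fun q hq => h q (by simp [hq]))
    · simp [List.dropWhile_cons, hd]

-- same for the Grab queue (the merge drops from the right list since i < g is false)
theorem grabMerge_dropG (k i : Int) (P' G' : List Int) :
    ∀ pend : List Int, (∀ p ∈ pend, p < i) →
    grabMerge k (i :: P') (pend ++ G') =
      grabMerge k (i :: P') (pend.dropWhile (fun p => decide (i - p > k)) ++ G') := by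
  intro pend
  induction pend with
  | nil => intro _; rfl
  | cons g t ih =>
    intro h
    have hg : g < i := h g (by simp)
    by_cases hd : i - g > k
    · have habs : ¬ |i - g| ≤ k := by rw [abs_of_pos (by omega)]; omega
      have hlt : ¬ i < g := by omega
      simp only [List.dropWhile_cons, hd, decide_true, if_true, List.cons_append, grabMerge, habs,
        if_false, if_neg hlt]
      exact ih (fun q hq => h q (by simp [hq]))
    · simp [List.dropWhile_cons, hd]

-- main invariant: the streaming pass with a pending queue of either type computes
-- res + (what A's merge yields on the pending queue prepended to the future lists)
theorem grabGo_merge (k : Int) : ∀ (rest : List String) (i : Int) (pend : List Int) (res : Int),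
    (∀ p ∈ pend, p < i) →
    (grabGo k rest i pend "P" res
        = res + grabMerge k (pend ++ (grabBuildPG rest i).2) (grabBuildPG rest i).1) ∧
    (grabGo k rest i pend "G" res
        = res + grabMerge k ((grabBuildPG rest i).2) (pend ++ (grabBuildPG rest i).1)) := by
  intro rest
  induction rest with
  | nil =>
    intro i pend res _
    constructor <;> · show res = res + grabMerge k _ _
                      cases pend <;> simp [grabBuildPG, grabMerge]
  | cons c rs ih =>
    intro i pend res hb
    have hb' : ∀ p ∈ pend, p < i + 1 := fun p hp => by have := hb p hp; omega
    have hbp : ∀ p ∈ pend ++ [i], p < i + 1 := by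
      intro p hp; rcases List.mem_append.mp hp with h | h
      · have := hb p h; omega
      · simp at h; omega
    by_cases hG : c = "G"
    · subst hG
      rcases pend.eq_nil_or_concat with hnil | hcat
      · subst hnil
        constructor
        · simp only [grabGo, grabBuildPG, String.reduceEq, not_true, not_false_iff, or_true,
            or_false, true_or, ite_true, ite_false, reduceIte, List.nil_append]
          have := (ih (i + 1) [i] res (by intro p hp; simp at hp; omega)).2
          simp only [List.nil_append] at this ⊢
          simp [this]
        · simp only [grabGo, grabBuildPG, String.reduceEq, not_true, not_false_iff, or_true,
            or_false, true_or, ite_true, ite_false, reduceIte, List.nil_append]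
          have := (ih (i + 1) ([] ++ [i]) res hbp).2
          simp only [List.nil_append] at this ⊢
          simp [this]
      · have hne : pend ≠ [] := by rcases hcat with ⟨l, b, rfl⟩; simp
        constructor
        · -- pending is Pass-type, current char 'G'
          simp only [grabGo, grabBuildPG, String.reduceEq, not_true, not_false_iff, or_true,
            or_false, true_or, ite_true, ite_false, reduceIte]
          rw [if_neg hne]
          rw [grabMerge_dropP k i (grabBuildPG rs (i + 1)).2 (grabBuildPG rs (i + 1)).1 pend hb]
          have hsub : ∀ q ∈ pend.dropWhile (fun p => decide (i - p > k)), q < i := by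
            intro q hq; exact hb q (pvDropWhile_mem _ pend q hq)
          cases hdw : pend.dropWhile (fun p => decide (i - p > k)) with
          | nil =>
            have := (ih (i + 1) [i] res (by intro p hp; simp at hp; omega)).2
            simp [this]
          | cons p ps =>
            have hle : i - p ≤ k := by
              have := pvDropWhile_head_false _ pend p ps hdw
              simp at this; omega
            have hp : p < i := hsub p (by simp [hdw])
            have habs : |p - i| ≤ k := by rw [abs_sub_comm, abs_of_pos (by omega)]; omega
            simp only [List.cons_append, grabMerge, if_pos habs]
            have := (ih (i + 1) ps (res + 1) (fun q hq => by
              have := hsub q (by simp [hdw, hq]); omega)).1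
            rw [this]; ring
        · -- pending is Grab-type, current char 'G': just enqueue
          simp only [grabGo, grabBuildPG, String.reduceEq, not_true, not_false_iff, or_true,
            or_false, true_or, ite_true, ite_false, reduceIte]
          have := (ih (i + 1) (pend ++ [i]) res hbp).2
          simp [this]
    · by_cases hP : c = "P"
      · subst hP
        rcases pend.eq_nil_or_concat with hnil | hcat
        · subst hnil
          constructor
          · simp only [grabGo, grabBuildPG, String.reduceEq, not_true, not_false_iff, or_true,
              or_false, true_or, ite_true, ite_false, reduceIte, List.nil_append]
            have := (ih (i + 1) ([] ++ [i]) res hbp).1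
            simp only [List.nil_append] at this ⊢
            simp [this]
          · simp only [grabGo, grabBuildPG, String.reduceEq, not_true, not_false_iff, or_true,
              or_false, true_or, ite_true, ite_false, reduceIte, List.nil_append]
            have := (ih (i + 1) [i] res (by intro p hp; simp at hp; omega)).1
            simp only [List.nil_append] at this ⊢
            simp [this]
        · have hne : pend ≠ [] := by rcases hcat with ⟨l, b, rfl⟩; simp
          constructor
          · -- pending is Pass-type, current char 'P': just enqueue
            simp only [grabGo, grabBuildPG, String.reduceEq, not_true, not_false_iff, or_true,
              or_false, true_or, ite_true, ite_false, reduceIte]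
            have := (ih (i + 1) (pend ++ [i]) res hbp).1
            simp [this]
          · -- pending is Grab-type, current char 'P'
            simp only [grabGo, grabBuildPG, String.reduceEq, not_true, not_false_iff, or_true,
              or_false, true_or, ite_true, ite_false, reduceIte]
            rw [if_neg hne]
            rw [grabMerge_dropG k i (grabBuildPG rs (i + 1)).2 (grabBuildPG rs (i + 1)).1 pend hb]
            have hsub : ∀ q ∈ pend.dropWhile (fun p => decide (i - p > k)), q < i := by
              intro q hq; exact hb q (pvDropWhile_mem _ pend q hq)
            cases hdw : pend.dropWhile (fun p => decide (i - p > k)) with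
            | nil =>
              have := (ih (i + 1) [i] res (by intro p hp; simp at hp; omega)).1
              simp [this]
            | cons g gs =>
              have hle : i - g ≤ k := by
                have := pvDropWhile_head_false _ pend g gs hdw
                simp at this; omega
              have hg : g < i := hsub g (by simp [hdw])
              have habs : |i - g| ≤ k := by rw [abs_of_pos (by omega)]; omega
              simp only [List.cons_append, grabMerge, if_pos habs]
              have := (ih (i + 1) gs (res + 1) (fun q hq => by
                have := hsub q (by simp [hdw, hq]); omega)).2
              rw [this]; ring
      · -- non-'G'/'P' character: both sides skip it
        constructor <;>
        · simp only [grabGo, grabBuildPG]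
          rw [if_pos (by simp [hG, hP])]
          simp only [if_neg hG, if_neg hP]
          first
            | exact (ih (i + 1) pend res hb').1
            | exact (ih (i + 1) pend res hb').2

-- ===== VERDICT (by name: the statement is the Claim_ definition above) =====
theorem grabNgub_spec : Claim_equal_grabNgub := by
  intro arr k _
  show grabNgub arr k = grabNgub_alt arr k
  unfold grabNgub grabNgub_alt
  rw [grabGo_nil_type k arr 0 0 "" "P"]
  have := (grabGo_merge k arr 0 [] 0 (by simp)).1
  simp only [List.nil_append] at this
  simp [this]
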